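-- pv_equiv track=rewrite | github.com/facebook/buck | programs/buck_tool.py | _format_jvm_errors
-- ===== SOURCE A (Python) =====
-- def _format_jvm_errors(fp):
--     errors = []
--     keep = False
--     for line in fp:
--         if line.startswith("Stack:"):
--             keep = True
--         if line.startswith("---------------  P R O C E S S  ---------------"):
--             break
--         if keep:
--             errors.append(line)
--     message = "JVM native crash: " + (errors[2] if len(errors) > 2 else "")
--     return message, "".join(errors)
-- ===== SOURCE B (Python) =====
-- _PROC = "---------------  P R O C E S S  ---------------"
--
-- def _format_jvm_errors(fp):
--     lines = list(fp)
--     end = next((i for i, l in enumerate(lines) if l.startswith(_PROC)), len(lines))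
--     start = next((i for i in range(end) if lines[i].startswith("Stack:")), end)
--     errors = lines[start:end]
--     message = "JVM native crash: " + (errors[2] if len(errors) > 2 else "")
--     return message, "".join(errors)
-- ===== Notes on version B (the rewrite author's own statement) =====
-- stated objective: alternative
-- what changed: Replaces the stateful keep-flag/break loop by explicit marker positions: find the index of the first PROCESS line, the index of the first Stack: line before it, and take the slice between them.
import Mathlib
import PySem

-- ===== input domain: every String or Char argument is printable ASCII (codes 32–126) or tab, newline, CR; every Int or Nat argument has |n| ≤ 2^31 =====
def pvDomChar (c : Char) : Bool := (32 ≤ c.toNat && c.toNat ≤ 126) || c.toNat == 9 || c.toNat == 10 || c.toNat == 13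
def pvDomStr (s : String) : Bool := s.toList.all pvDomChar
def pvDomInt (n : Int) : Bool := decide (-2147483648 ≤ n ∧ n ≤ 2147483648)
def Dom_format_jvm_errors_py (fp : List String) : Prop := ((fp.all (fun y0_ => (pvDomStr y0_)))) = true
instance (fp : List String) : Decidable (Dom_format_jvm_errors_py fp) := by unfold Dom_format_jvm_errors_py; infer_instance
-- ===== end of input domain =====

-- B replaces A's stateful keep-flag/break loop by explicit marker indices and a slice (alternative decomposition, same cost).

def pvProc : String := "---------------  P R O C E S S  ---------------"

-- ===== PORT A =====
-- A's for-loop with the mutable 'keep' flag and 'break', as structural recursion over the lines.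
def pvALoop : List String → Bool → List String
  | [], _ => []
  | l :: ls, keep =>
    let keep' := if PySem.Str.startswith l "Stack:" then true else keep
    if PySem.Str.startswith l pvProc then []
    else (if keep' then [l] else []) ++ pvALoop ls keep'

def format_jvm_errors_py (fp : List String) : String × String :=
  let errors := pvALoop fp false
  let message := "JVM native crash: " ++ (if errors.length > 2 then (PySem.List.pyGet? errors 2).getD "" else "")
  (message, PySem.Str.join "" errors)

-- ===== PORT B =====
-- end = next((i for i, l in enumerate(lines) if l.startswith(_PROC)), len(lines))
def pvEnd (lines : List String) : Nat :=
  (lines.findIdx? (fun l => PySem.Str.startswith l pvProc)).getD lines.length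

-- start = next((i for i in range(end) if lines[i].startswith("Stack:")), end)
def pvStart (lines : List String) : Nat :=
  ((lines.take (pvEnd lines)).findIdx? (fun l => PySem.Str.startswith l "Stack:")).getD (pvEnd lines)

def format_jvm_errors_py_alt (fp : List String) : String × String :=
  let errors := PySem.List.slice fp (some ((pvStart fp : Nat) : Int)) (some ((pvEnd fp : Nat) : Int))
  let message := "JVM native crash: " ++ (if errors.length > 2 then (PySem.List.pyGet? errors 2).getD "" else "")
  (message, PySem.Str.join "" errors)

-- ===== PRECONDITION & SPEC =====
def Spec_format_jvm_errors_py (fp : List String) (out : String × String) : Prop := out = format_jvm_errors_py_alt fp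
instance (fp : List String) (out : String × String) : Decidable (Spec_format_jvm_errors_py fp out) := by unfold Spec_format_jvm_errors_py; infer_instance

-- ===== CLAIM (what is proved, stated in full; the proofs are below) =====
def Claim_equal_format_jvm_errors_py : Prop := ∀ (fp : List String), Dom_format_jvm_errors_py fp → Spec_format_jvm_errors_py fp (format_jvm_errors_py fp)

-- ===== LEMMAS AND PROOFS =====

-- B's slice between the two marker indices, as a named value for the lemmas below.
def pvErrB (fp : List String) : List String :=
  PySem.List.slice fp (some ((pvStart fp : Nat) : Int)) (some ((pvEnd fp : Nat) : Int))

-- Once 'keep' is true, A simply collects lines until the first PROCESS line.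
theorem pvALoop_true (ls : List String) :
    pvALoop ls true = ls.takeWhile (fun l => !PySem.Str.startswith l pvProc) := by
  induction ls with
  | nil => rfl
  | cons l ls ih =>
    simp only [pvALoop, ite_self, List.takeWhile_cons]
    cases hp : PySem.Str.startswith l pvProc with
    | true => simp
    | false => simp [ih]

-- take up to the first index satisfying p is takeWhile (!p)
theorem pv_take_findIdx? {α : Type} (p : α → Bool) (ls : List α) :
    ls.take (((ls.findIdx? p).getD ls.length)) = ls.takeWhile (fun x => !p x) := by
  induction ls with
  | nil => rfl
  | cons l ls ih =>
    rw [List.findIdx?_cons]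
    cases h : p l with
    | true => simp [h]
    | false =>
      cases hf : ls.findIdx? p <;> rw [hf] at ih <;>
        simp [h, ← ih, List.take_succ_cons]

theorem pvEnd_cons_pos {l : String} (ls : List String)
    (h : PySem.Str.startswith l pvProc = true) : pvEnd (l :: ls) = 0 := by
  simp only [pvEnd, List.findIdx?_cons, h, reduceIte, Option.getD_some]

theorem pvEnd_cons_neg {l : String} (ls : List String)
    (h : PySem.Str.startswith l pvProc = false) : pvEnd (l :: ls) = pvEnd ls + 1 := by
  simp only [pvEnd, List.findIdx?_cons, h, Bool.false_eq_true, reduceIte, List.length_cons]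
  cases hf : ls.findIdx? (fun l => PySem.Str.startswith l pvProc) <;> simp

theorem pvErrB_cons_proc {l : String} (ls : List String)
    (h : PySem.Str.startswith l pvProc = true) : pvErrB (l :: ls) = [] := by
  have he := pvEnd_cons_pos ls h
  have hst : pvStart (l :: ls) = 0 := by
    simp only [pvStart, he, List.take_zero, List.findIdx?_nil, Option.getD_none]
  rw [pvErrB, PySem.List.slice_natCast, he, hst]
  simp

theorem pvErrB_cons_stack {l : String} (ls : List String)
    (hp : PySem.Str.startswith l pvProc = false)
    (hs : PySem.Str.startswith l "Stack:" = true) :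
    pvErrB (l :: ls) = l :: ls.takeWhile (fun x => !PySem.Str.startswith x pvProc) := by
  have he := pvEnd_cons_neg ls hp
  have hst : pvStart (l :: ls) = 0 := by
    simp only [pvStart, he, List.take_succ_cons, List.findIdx?_cons, hs, reduceIte,
      Option.getD_some]
  rw [pvErrB, PySem.List.slice_natCast, he, hst]
  simp only [List.drop_zero, Nat.sub_zero, List.take_succ_cons, List.cons.injEq, true_and]
  rw [← pv_take_findIdx?]
  rfl

theorem pvErrB_cons_skip {l : String} (ls : List String)
    (hp : PySem.Str.startswith l pvProc = false)
    (hs : PySem.Str.startswith l "Stack:" = false) :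
    pvErrB (l :: ls) = pvErrB ls := by
  have he := pvEnd_cons_neg ls hp
  have hst : pvStart (l :: ls) = pvStart ls + 1 := by
    simp only [pvStart, he, List.take_succ_cons, List.findIdx?_cons, hs, Bool.false_eq_true,
      reduceIte]
    cases hf : (ls.take (pvEnd ls)).findIdx? (fun l => PySem.Str.startswith l "Stack:") <;>
      simp
  rw [pvErrB, pvErrB, PySem.List.slice_natCast, PySem.List.slice_natCast, he, hst]
  simp only [List.drop_succ_cons, Nat.succ_sub_succ]

-- Main loop lemma: A's loop (keep=false) equals B's slice between the markers.
theorem pvLoop_eq_slice (fp : List String) : pvALoop fp false = pvErrB fp := by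
  induction fp with
  | nil => rfl
  | cons l ls ih =>
    cases hp : PySem.Str.startswith l pvProc with
    | true =>
      rw [pvErrB_cons_proc ls hp]
      simp only [pvALoop]
      rw [hp]
      simp only [reduceIte]
    | false =>
      cases hs : PySem.Str.startswith l "Stack:" with
      | true =>
        rw [pvErrB_cons_stack ls hp hs]
        simp only [pvALoop]
        rw [hp, hs]
        simp [pvALoop_true]
      | false =>
        rw [pvErrB_cons_skip ls hp hs, ← ih]
        simp only [pvALoop]
        rw [hp, hs]
        simp

-- ===== VERDICT (by name: the statement is the Claim_ definition above) =====
theorem format_jvm_errors_py_spec : Claim_equal_format_jvm_errors_py := by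
  intro fp _
  unfold Spec_format_jvm_errors_py format_jvm_errors_py format_jvm_errors_py_alt
  rw [show PySem.List.slice fp (some ((pvStart fp : Nat) : Int)) (some ((pvEnd fp : Nat) : Int)) = pvErrB fp from rfl,
    pvLoop_eq_slice]
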